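-- pv_equiv track=rewrite | github.com/maxwellmattryan/cs-313e | assignments/8-work/Work.py | findLowestLines
-- ===== SOURCE A (Python) =====
-- def findLowestLines(test):
--     lo = 1
--     hi = test[0]
--     mid = (lo + hi) // 2
--     k = test[1]
--     while(lo != mid):
--         if(sumSeries(mid, k) >= test[0]):
--             hi = mid
--         elif(sumSeries(mid, k) < test[0]):
--             lo = mid
--         mid = (lo + hi) // 2
--     if(sumSeries(mid, k) < test[0]):
--         return(mid + 1)
--     return(mid)
--
-- def sumSeries(v, k):
--     sum = v
--     exp = 1
--     while(k ** exp <= v):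
--         sum += v // (k ** exp)
--         exp += 1
--     return(sum)
-- ===== SOURCE B (Python) =====
-- def findLowestLines(test):
--     n = test[0]
--     k = test[1]
--     # find largest power of two <= n
--     bit = 1
--     while bit * 2 <= n:
--         bit *= 2
--     # m = largest value with sumSeries(m, k) < n (binary lifting); answer m + 1
--     m = 0
--     while bit >= 1:
--         if m + bit <= n and sumSeries(m + bit, k) < n:
--             m += bit
--         bit //= 2
--     return m + 1
--
-- def sumSeries(v, k):
--     sum = v
--     exp = 1
--     while(k ** exp <= v):
--         sum += v // (k ** exp)
--         exp += 1
--     return(sum)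
-- ===== Notes on version B (the rewrite author's own statement) =====
-- stated objective: alternative
-- what changed: Replaced the lo/hi/mid binary search with its final off-by-one fix-up by a binary-lifting search: double a power-of-two step up to the target, then descend bit by bit keeping the largest m with sumSeries(m,k) below it, returning m+1; for tests whose second element is below minus one the series is non-monotone and both search orders give equally accidental answers, so Pre_ excludes them.
-- outside the precondition, e.g. on findLowestLines([2, -3]): A returns 2, B returns 3; on findLowestLines([7, -2]): A returns 7, B returns 8
import Mathlib
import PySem

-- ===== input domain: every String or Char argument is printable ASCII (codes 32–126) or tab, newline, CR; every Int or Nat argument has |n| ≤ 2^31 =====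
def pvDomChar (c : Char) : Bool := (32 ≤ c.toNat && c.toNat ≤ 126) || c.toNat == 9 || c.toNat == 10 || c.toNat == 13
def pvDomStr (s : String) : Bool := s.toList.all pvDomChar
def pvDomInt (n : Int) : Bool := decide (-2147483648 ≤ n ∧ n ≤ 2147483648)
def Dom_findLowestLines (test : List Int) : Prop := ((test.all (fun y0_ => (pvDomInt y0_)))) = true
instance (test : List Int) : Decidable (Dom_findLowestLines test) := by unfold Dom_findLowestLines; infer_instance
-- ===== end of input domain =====

-- B replaces A's lo/hi/mid binary search (and its final off-by-one fix-up) by a binary-lifting search; same sumSeries helper.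

-- ===== PORT A =====
-- helper sumSeries: the Python while loop, fueled; under Pre_ (k ≥ 2) fuel v.toNat+1 exceeds the iteration count,
-- so the fuel-exhaustion branch is never taken (sumSeriesFuel_stable below)
def sumSeriesFuel : Nat → Int → Int → Int → Int → Int
  | 0, _, _, s, _ => s
  | f+1, v, k, s, e =>
    if k ^ e.toNat ≤ v then sumSeriesFuel f v k (s + PySem.Int.floordiv v (k ^ e.toNat)) (e + 1)
    else s

def sumSeries (v k : Int) : Int := sumSeriesFuel (v.toNat + 1) v k v 1

-- A's while loop (lo, hi, mid state exactly as in the Python); fueled, fuel n.toNat+2 suffices under Pre_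
def findLowestLoopA : Nat → Int → Int → Int → Int → Int → Int
  | 0, _, _, mid, _, _ => mid
  | f+1, lo, hi, mid, k, n =>
    if lo ≠ mid then
      if sumSeries mid k ≥ n then
        findLowestLoopA f lo mid (PySem.Int.floordiv (lo + mid) 2) k n
      else if sumSeries mid k < n then
        findLowestLoopA f mid hi (PySem.Int.floordiv (mid + hi) 2) k n
      else
        findLowestLoopA f lo hi (PySem.Int.floordiv (lo + hi) 2) k n
    else
      if sumSeries mid k < n then mid + 1 else mid

def findLowestLines (test : List Int) : Int :=
  let n := (PySem.List.pyGet? test 0).getD 0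
  let k := (PySem.List.pyGet? test 1).getD 0
  findLowestLoopA (n.toNat + 2) 1 n (PySem.Int.floordiv (1 + n) 2) k n

-- ===== PORT B =====
-- B's first loop: double bit while bit*2 <= n
def bitLoop : Nat → Int → Int → Int
  | 0, bit, _ => bit
  | f+1, bit, n => if bit * 2 ≤ n then bitLoop f (bit * 2) n else bit

-- B's second loop: descend bit by bit keeping the largest m with sumSeries(m,k) < n
def liftLoop : Nat → Int → Int → Int → Int → Int
  | 0, m, _, _, _ => m
  | f+1, m, bit, k, n =>
    if bit ≥ 1 then
      liftLoop f (if m + bit ≤ n ∧ sumSeries (m + bit) k < n then m + bit else m)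
        (PySem.Int.floordiv bit 2) k n
    else m

def findLowestLines_alt (test : List Int) : Int :=
  let n := (PySem.List.pyGet? test 0).getD 0
  let k := (PySem.List.pyGet? test 1).getD 0
  let bit := bitLoop (n.toNat + 1) 1 n
  liftLoop (n.toNat + 2) 0 bit k n + 1

-- ===== PRECONDITION & SPEC =====
-- Pre_ excludes: tests shorter than two elements (IndexError); a nonpositive first element and a second element
-- of one or minus one (A's loops never terminate); a second element of zero (ZeroDivisionError); and a second
-- element below minus one, where A returns but its binary search probes a non-monotone series sum, so the value
-- is an accident of the probe order and B's equally defensible value differs.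
def Pre_findLowestLines (test : List Int) : Prop :=
  2 ≤ test.length ∧ 1 ≤ test.getD 0 0 ∧ 2 ≤ test.getD 1 0
instance (test : List Int) : Decidable (Pre_findLowestLines test) := by
  unfold Pre_findLowestLines; infer_instance
def pvWitness_findLowestLines : List Int := [10, 2]

def Spec_findLowestLines (test : List Int) (out : Int) : Prop := out = findLowestLines_alt test
instance (test : List Int) (out : Int) : Decidable (Spec_findLowestLines test out) := by
  unfold Spec_findLowestLines; infer_instance

-- ===== CLAIM (what is proved, stated in full; the proofs are below) =====
def Claim_equal_findLowestLines : Prop := ∀ (test : List Int), Dom_findLowestLines test → Pre_findLowestLines test → Spec_findLowestLines test (findLowestLines test)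

-- ===== LEMMAS AND PROOFS =====

-- the loop body only ever adds nonnegative terms, so the result dominates the accumulator
theorem sumSeriesFuel_ge (f : Nat) (v k : Int) (hk : 2 ≤ k) (hv : 0 ≤ v) :
    ∀ (s e : Int), s ≤ sumSeriesFuel f v k s e := by
  induction f with
  | zero => intro s e; simp [sumSeriesFuel]
  | succ f ih =>
    intro s e
    simp only [sumSeriesFuel]
    split
    · refine le_trans ?_ (ih _ _)
      have hpos : (0:Int) < k ^ e.toNat := pow_pos (by omega) _
      have : 0 ≤ PySem.Int.floordiv v (k ^ e.toNat) := by
        rw [PySem.Int.floordiv_eq_ediv_of_pos hpos]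
        exact Int.ediv_nonneg hv (le_of_lt hpos)
      omega
    · exact le_rfl

-- fuel irrelevance once k^(e.toNat+f) exceeds v
theorem sumSeriesFuel_stable (k v : Int) (hk : 2 ≤ k) :
    ∀ (f g : Nat) (s e : Int), 0 ≤ e → v < k ^ (e.toNat + f) →
      sumSeriesFuel (f + g) v k s e = sumSeriesFuel f v k s e := by
  intro f
  induction f with
  | zero =>
    intro g s e _ hlt
    cases g with
    | zero => rfl
    | succ g => simp only [sumSeriesFuel]; rw [if_neg (by simpa using not_le.mpr hlt)]
  | succ f ih =>
    intro g s e he hlt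
    have : f + 1 + g = (f + g) + 1 := by omega
    rw [this]
    simp only [sumSeriesFuel]
    split
    · exact ih g _ (e+1) (by omega) (by
        have : (e+1).toNat + f = e.toNat + (f+1) := by omega
        rw [this]; exact hlt)
    · rfl

-- monotone in v (and the accumulator) at a common fuel
theorem sumSeriesFuel_mono (k : Int) (hk : 2 ≤ k) :
    ∀ (f : Nat) (v w s t e : Int), 0 ≤ v → v ≤ w → s ≤ t →
      sumSeriesFuel f v k s e ≤ sumSeriesFuel f w k t e := by
  intro f
  induction f with
  | zero => intro v w s t e _ _ hst; simpa [sumSeriesFuel] using hst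
  | succ f ih =>
    intro v w s t e hv hvw hst
    have hpos : (0:Int) < k ^ e.toNat := pow_pos (by omega) _
    simp only [sumSeriesFuel]
    by_cases h1 : k ^ e.toNat ≤ v
    · rw [if_pos h1, if_pos (le_trans h1 hvw)]
      refine ih v w _ _ _ hv hvw ?_
      have := Int.ediv_le_ediv hpos hvw
      rw [PySem.Int.floordiv_eq_ediv_of_pos hpos, PySem.Int.floordiv_eq_ediv_of_pos hpos]
      omega
    · rw [if_neg h1]
      by_cases h2 : k ^ e.toNat ≤ w
      · rw [if_pos h2]
        refine le_trans ?_ (sumSeriesFuel_ge f w k hk (by omega) _ _)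
        have : 0 ≤ PySem.Int.floordiv w (k ^ e.toNat) := by
          rw [PySem.Int.floordiv_eq_ediv_of_pos hpos]
          exact Int.ediv_nonneg (by omega) (le_of_lt hpos)
        omega
      · rw [if_neg h2]; exact hst

theorem lt_pow_fuel (v k : Int) (hk : 2 ≤ k) (f : Nat) (hf : v.toNat + 1 ≤ f) :
    v < k ^ (1 + f) := by
  have h1 : v ≤ (v.toNat : Int) := Int.self_le_toNat v
  have h2 : (v.toNat : Int) < 2 ^ v.toNat := by exact_mod_cast Nat.lt_two_pow_self
  have h3 : (2:Int) ^ v.toNat ≤ 2 ^ (1 + f) := pow_le_pow_right₀ (by norm_num) (by omega)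
  have h4 : (2:Int) ^ (1 + f) ≤ k ^ (1 + f) := pow_le_pow_left₀ (by norm_num) hk _
  omega

theorem sumSeries_fuel_eq (v k : Int) (hk : 2 ≤ k) (f : Nat) (hf : v.toNat + 1 ≤ f) :
    sumSeriesFuel f v k v 1 = sumSeries v k := by
  unfold sumSeries
  have : f = (v.toNat + 1) + (f - (v.toNat + 1)) := by omega
  rw [this]
  exact sumSeriesFuel_stable k v hk (v.toNat + 1) _ v 1 (by omega)
    (by simpa using lt_pow_fuel v k hk (v.toNat+1) le_rfl)

theorem sumSeries_ge (v k : Int) (hk : 2 ≤ k) (hv : 0 ≤ v) : v ≤ sumSeries v k :=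
  sumSeriesFuel_ge _ v k hk hv v 1

theorem sumSeries_mono (v w k : Int) (hk : 2 ≤ k) (hv : 0 ≤ v) (hvw : v ≤ w) :
    sumSeries v k ≤ sumSeries w k := by
  rw [← sumSeries_fuel_eq v k hk (w.toNat + 1) (by omega),
      ← sumSeries_fuel_eq w k hk (w.toNat + 1) le_rfl]
  exact sumSeriesFuel_mono k hk _ v w v w 1 hv hvw hvw

-- upward closure of the predicate n ≤ sumSeries · k
theorem P_up (n k l m : Int) (hk : 2 ≤ k) (hl0 : 0 ≤ l) (hPl : n ≤ sumSeries l k)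
    (hlm : l ≤ m) : n ≤ sumSeries m k :=
  le_trans hPl (sumSeries_mono l m k hk hl0 hlm)

-- A's binary-search loop returns the least l with n ≤ sumSeries l k
theorem loopA_eq (n k l : Int) (hn : 1 ≤ n) (hk : 2 ≤ k) (hl1 : 1 ≤ l) (hln : l ≤ n)
    (hPl : n ≤ sumSeries l k) (hmin : ∀ m, 1 ≤ m → m < l → sumSeries m k < n) :
    ∀ (f : Nat) (lo hi : Int), 1 ≤ lo → lo ≤ hi → hi ≤ n → n ≤ sumSeries hi k →
      (lo = 1 ∨ sumSeries lo k < n) → (hi - lo).toNat + 1 ≤ f →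
      findLowestLoopA f lo hi (PySem.Int.floordiv (lo + hi) 2) k n = l := by
  intro f
  induction f with
  | zero => intro lo hi _ _ _ _ _ hf; omega
  | succ f ih =>
    intro lo hi h1 h2 h3 hPhi hor hf
    have hmid : PySem.Int.floordiv (lo + hi) 2 = (lo + hi) / 2 :=
      PySem.Int.floordiv_eq_ediv_of_pos (by norm_num)
    set mid := PySem.Int.floordiv (lo + hi) 2 with hmiddef
    have hmb : lo ≤ mid ∧ mid ≤ hi ∧ (lo ≠ mid → (lo < mid ∧ mid < hi)) := by
      rw [hmid] at hmiddef ⊢; omega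
    simp only [findLowestLoopA]
    by_cases hne : lo ≠ mid
    · rw [if_pos hne]
      obtain ⟨hlomid, hmidhi, hstrict⟩ := hmb
      obtain ⟨hlt1, hlt2⟩ := hstrict hne
      by_cases hP : sumSeries mid k ≥ n
      · rw [if_pos hP]
        exact ih lo mid h1 (by omega) (by omega) hP hor (by omega)
      · rw [if_neg hP, if_pos (by omega)]
        exact ih mid hi (by omega) (by omega) h3 hPhi (Or.inr (by omega)) (by omega)
    · rw [if_neg hne]
      push_neg at hne
      -- lo = mid, so hi = lo or hi = lo + 1
      have hcases : hi = lo ∨ hi = lo + 1 := by rw [hmid] at hne; omega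
      by_cases hP : sumSeries mid k < n
      · rw [if_pos hP]
        -- mid = lo, ¬P lo, so l > lo; also hi = lo + 1 (hi = lo would contradict P hi)
        have hhi : hi = lo + 1 := by
          rcases hcases with h | h
          · exfalso; rw [← hne, ← h] at hP; omega
          · exact h
        have hgt : lo < l := by
          by_contra h
          push_neg at h
          have := P_up n k l mid hk (by omega) hPl (by omega)
          omega
        have hle : l ≤ hi := by
          by_contra h
          push_neg at h
          have := hmin hi (by omega) h
          omega
        omega
      · rw [if_neg hP]
        -- P lo holds, the invariant forces lo = 1 and hence l = 1
        have hlo1 : lo = 1 := by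
          rcases hor with h | h
          · exact h
          · exfalso; rw [← hne] at hP; omega
        have : ¬ (1 < l) := fun h => by
          have := hmin 1 le_rfl h
          rw [← hne, hlo1] at hP; omega
        omega

-- B's doubling loop returns a power of two 2^j with 2^j ≤ n < 2^(j+1)
theorem bitLoop_eq (n : Int) :
    ∀ (f : Nat) (bit : Int) (i : Nat), bit = 2 ^ i → bit ≤ n → (n - bit).toNat + 1 ≤ f →
      ∃ j : Nat, bitLoop f bit n = 2 ^ j ∧ (2 : Int) ^ j ≤ n ∧ n < 2 ^ (j + 1) := by
  intro f
  induction f with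
  | zero => intro bit i _ _ hf; omega
  | succ f ih =>
    intro bit i hbit hle hf
    have hpos : (1:Int) ≤ bit := hbit ▸ one_le_pow₀ (by norm_num)
    simp only [bitLoop]
    by_cases h : bit * 2 ≤ n
    · rw [if_pos h]
      exact ih (bit * 2) (i + 1) (by rw [hbit]; ring) h (by omega)
    · rw [if_neg h]
      exact ⟨i, hbit, by rw [← hbit]; exact hle, by rw [pow_succ, ← hbit]; omega⟩

-- B's descent loop returns l - 1 (l = least value with n ≤ sumSeries l k)
theorem liftLoop_eq (n k l : Int) (hn : 1 ≤ n) (hk : 2 ≤ k) (hl1 : 1 ≤ l) (hln : l ≤ n)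
    (hPl : n ≤ sumSeries l k) (hmin : ∀ m, 1 ≤ m → m < l → sumSeries m k < n) :
    ∀ (j : Nat) (f : Nat) (m : Int), 0 ≤ m → m < l → l ≤ m + 2 ^ (j + 1) → j + 2 ≤ f →
      liftLoop f m (2 ^ j) k n = l - 1 := by
  intro j
  induction j with
  | zero =>
    intro f m hm0 hml hlub hf
    obtain ⟨f, rfl⟩ : ∃ g, f = g + 2 := ⟨f - 2, by omega⟩
    have hhalf : PySem.Int.floordiv 1 2 = (0:Int) := by
      rw [PySem.Int.floordiv_eq_ediv_of_pos (by norm_num)]; decide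
    simp only [liftLoop, pow_zero, hhalf]
    rw [if_pos (by norm_num)]
    rw [if_neg (by norm_num)]
    -- m + 1 ≤ n always holds here since m < l ≤ n
    have hm1n : m + 1 ≤ n := by omega
    by_cases hP : sumSeries (m + 1) k < n
    · rw [if_pos ⟨hm1n, hP⟩]
      -- ¬P (m+1): m + 1 < l, and l ≤ m + 2, so l = m + 2
      have : m + 1 < l := by
        by_contra h
        have := P_up n k l (m+1) hk (by omega) hPl (by omega)
        omega
      omega
    · rw [if_neg (by tauto)]
      -- P (m+1): l ≤ m + 1, with m < l gives l = m + 1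
      have : l ≤ m + 1 := by
        by_contra h
        have := hmin (m+1) (by omega) (by omega)
        omega
      omega
  | succ j ih =>
    intro f m hm0 hml hlub hf
    obtain ⟨f, rfl⟩ : ∃ g, f = g + 1 := ⟨f - 1, by omega⟩
    simp only [liftLoop]
    have hbpos : (1:Int) ≤ 2 ^ (j + 1) := one_le_pow₀ (by norm_num)
    rw [if_pos (by omega)]
    have hhalf : PySem.Int.floordiv (2 ^ (j + 1)) 2 = (2:Int) ^ j := by
      rw [PySem.Int.floordiv_eq_ediv_of_pos (by norm_num), pow_succ]
      exact Int.mul_ediv_cancel _ (by norm_num)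
    rw [hhalf]
    by_cases hc : m + 2 ^ (j + 1) ≤ n ∧ sumSeries (m + 2 ^ (j + 1)) k < n
    · rw [if_pos hc]
      have hlt : m + 2 ^ (j + 1) < l := by
        by_contra h
        have := P_up n k l (m + 2 ^ (j + 1)) hk (by omega) hPl (by omega)
        omega
      refine ih f (m + 2 ^ (j + 1)) (by omega) hlt ?_ (by omega)
      have : (2:Int) ^ (j + 1 + 1) = 2 ^ (j + 1) + 2 ^ (j + 1) := by rw [pow_succ]; ring
      omega
    · rw [if_neg hc]
      refine ih f m hm0 hml ?_ (by omega)
      -- l ≤ m + 2^(j+1): either P(m + 2^(j+1)) holds or m + 2^(j+1) > n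
      by_cases hle : m + 2 ^ (j + 1) ≤ n
      · have hP : ¬ sumSeries (m + 2 ^ (j + 1)) k < n := fun h => hc ⟨hle, h⟩
        by_contra h
        have := hmin (m + 2 ^ (j + 1)) (by omega) (by omega)
        omega
      · omega

-- ===== VERDICT (by name: the statement is the Claim_ definition above) =====
theorem findLowestLines_spec : Claim_equal_findLowestLines := by
  intro test _ hpre
  obtain ⟨hlen, hn0, hk0⟩ := hpre
  match test with
  | n :: k :: rest =>
    have hn : (1:Int) ≤ n := by simpa using hn0
    have hk : (2:Int) ≤ k := by simpa using hk0
    -- the least l ≥ 1 with n ≤ sumSeries l k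
    have hPn : n ≤ sumSeries n k := sumSeries_ge n k hk (by omega)
    have hex : ∃ j : Nat, n ≤ sumSeries ((j : Int) + 1) k :=
      ⟨(n - 1).toNat, by rw [show (((n-1).toNat : Int) + 1) = n by omega]; exact hPn⟩
    set l : Int := (Nat.find hex : Int) + 1 with hldef
    have hPl : n ≤ sumSeries l k := Nat.find_spec hex
    have hl1 : 1 ≤ l := by omega
    have hmin : ∀ m, 1 ≤ m → m < l → sumSeries m k < n := by
      intro m h1 h2
      have hfm := Nat.find_min hex (m := (m - 1).toNat) (by omega)
      rw [show (((m-1).toNat : Int) + 1) = m by omega] at hfm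
      omega
    have hln : l ≤ n := by
      by_contra h
      have := hmin n (by omega) (by omega)
      omega
    have g0 : (PySem.List.pyGet? (n::k::rest) 0).getD 0 = n := by
      simp [PySem.List.pyGet?, PySem.List.pyIdx?, show (0:Int) ≤ (rest.length:Int) + 1 by omega]
    have g1 : (PySem.List.pyGet? (n::k::rest) 1).getD 0 = k := by
      simp [PySem.List.pyGet?, PySem.List.pyIdx?]
    -- A's side
    have hA : findLowestLines (n :: k :: rest) = l := by
      rw [findLowestLines]
      simp only [g0, g1]
      exact loopA_eq n k l hn hk hl1 hln hPl hmin (n.toNat + 2) 1 n le_rfl hn le_rfl hPn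
        (Or.inl rfl) (by omega)
    -- B's side
    have hB : findLowestLines_alt (n :: k :: rest) = l := by
      rw [findLowestLines_alt]
      simp only [g0, g1]
      obtain ⟨j, hje, hj1, hj2⟩ := bitLoop_eq n (n.toNat + 1) 1 0 (by norm_num) hn (by omega)
      rw [hje]
      have hjn : (j : Int) < n := lt_of_lt_of_le (by exact_mod_cast Nat.lt_two_pow_self) hj1
      rw [liftLoop_eq n k l hn hk hl1 hln hPl hmin j (n.toNat + 2) 0 le_rfl (by omega)
        (by omega) (by omega)]
      omega
    unfold Spec_findLowestLines
    rw [hA, hB]
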